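-- pv_equiv track=rewrite | github.com/tomexiskandar/hilookup | build/lib/hilookup/hilookup.py | split_alphanumeric
-- ===== SOURCE A (Python) =====
-- def split_alphanumeric(value,separator):
--     _new_value = []
--     prev_char = ''
--     for i in value:
--         if (prev_char.isalpha() and i.isnumeric()) or (i.isalpha() and prev_char.isnumeric()):
--             _new_value.append(separator)
--             _new_value.append(i)
--         else:
--             _new_value.append(i)
--         prev_char = i
--     return ''.join(_new_value)
-- ===== SOURCE B (Python) =====
-- def split_alphanumeric(value, separator):
--     # Two-phase: split into maximal same-class runs, then join runs,
--     # inserting separator exactly between an alpha run and a numeric run.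
--     def cls(c):
--         if c.isalpha():
--             return 0
--         if c.isnumeric():
--             return 1
--         return 2
--
--     out = []
--     prev_cls = -1
--     i = 0
--     n = len(value)
--     while i < n:
--         k = cls(value[i])
--         j = i + 1
--         while j < n and cls(value[j]) == k:
--             j += 1
--         if (prev_cls, k) in ((0, 1), (1, 0)):
--             out.append(separator)
--         out.append(value[i:j])
--         prev_cls = k
--         i = j
--     return ''.join(out)
-- ===== Notes on version B (the rewrite author's own statement) =====
-- stated objective: alternative
-- what changed: Replaces A's per-character boundary scan (compare each char with the previous one) by a two-phase run decomposition: an outer loop that takes each maximal run of same-class characters (alpha/numeric/other) with an inner takeWhile-style scan, then emits the separator exactly between an alpha run and a numeric run.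
import Mathlib
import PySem

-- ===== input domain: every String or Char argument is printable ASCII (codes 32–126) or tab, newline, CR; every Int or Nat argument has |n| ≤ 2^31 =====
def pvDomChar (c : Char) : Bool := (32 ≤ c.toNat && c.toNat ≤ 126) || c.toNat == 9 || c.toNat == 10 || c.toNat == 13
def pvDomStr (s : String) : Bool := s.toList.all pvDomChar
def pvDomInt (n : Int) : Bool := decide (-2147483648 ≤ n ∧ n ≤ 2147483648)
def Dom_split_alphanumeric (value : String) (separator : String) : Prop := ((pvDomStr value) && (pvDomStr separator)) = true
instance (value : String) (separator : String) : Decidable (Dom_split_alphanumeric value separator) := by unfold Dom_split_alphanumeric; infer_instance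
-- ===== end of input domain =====

-- B replaces A's per-character boundary scan by a two-phase run decomposition
-- (split into maximal same-class runs, then join runs inserting the separator
-- between an alpha run and a numeric run); objective: alternative.


-- ===== PORT A =====
-- str.isnumeric ported by hand (PySem has no isnumeric): nonempty and every char
-- numeric; a single char's numeric test is isdigit — exact on the ASCII domain,
-- where the numeric characters are exactly the digits '0'..'9'.
def pyIsnumeric (cs : List Char) : Bool := !cs.isEmpty && cs.all PySem.Chars.isdigit

-- A's per-character condition: prev_char.isalpha() and i.isnumeric(), or vice versa
-- (prev_char is the string '' before the first iteration, else the 1-char string [p]).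
def condA (prev : List Char) (c : Char) : Bool :=
  (PySem.Chars.strIsalpha prev && pyIsnumeric [c]) || (PySem.Chars.strIsalpha [c] && pyIsnumeric prev)

-- one iteration of A's for-loop: state = (_new_value joined so far, prev_char)
def stepA (sep : List Char) (st : List Char × List Char) (c : Char) : List Char × List Char :=
  if condA st.2 c then (st.1 ++ sep ++ [c], [c]) else (st.1 ++ [c], [c])

def split_alphanumeric (value : String) (separator : String) : String :=
  String.mk (value.toList.foldl (stepA separator.toList) ([], [])).1

-- ===== PORT B =====
-- B's character class: 0 = alpha, 1 = numeric, 2 = other (-1 = "no previous run")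
def clsB (c : Char) : Int :=
  if PySem.Chars.isalpha c then 0 else if pyIsnumeric [c] then 1 else 2

-- B's separator test between adjacent runs: (prev_cls, k) in ((0,1),(1,0))
def sepCondB (prev k : Int) : Bool := (prev == 0 && k == 1) || (prev == 1 && k == 0)

-- B's outer while-loop: take the maximal run of the first char's class
-- (inner while = takeWhile/dropWhile), emit separator if required, recurse.
def runsB (sep : List Char) (prev : Int) : List Char → List Char
  | [] => []
  | c :: rest =>
      ((if sepCondB prev (clsB c) then sep else []) ++
        (c :: rest.takeWhile (fun d => clsB d == clsB c))) ++
      runsB sep (clsB c) (rest.dropWhile (fun d => clsB d == clsB c))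
  termination_by l => l.length
  decreasing_by
    simpa using Nat.lt_succ_of_le (List.Sublist.length_le (List.dropWhile_sublist _))

def split_alphanumeric_alt (value : String) (separator : String) : String :=
  String.mk (runsB separator.toList (-1) value.toList)

-- ===== PRECONDITION & SPEC =====
def Spec_split_alphanumeric (value : String) (separator : String) (out : String) : Prop := out = split_alphanumeric_alt value separator
instance (value : String) (separator : String) (out : String) : Decidable (Spec_split_alphanumeric value separator out) := by unfold Spec_split_alphanumeric; infer_instance

-- ===== CLAIM (what is proved, stated in full; the proofs are below) =====
def Claim_equal_split_alphanumeric : Prop := ∀ (value : String) (separator : String), Dom_split_alphanumeric value separator → Spec_split_alphanumeric value separator (split_alphanumeric value separator)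

-- ===== LEMMAS AND PROOFS =====

-- A's loop with the accumulator peeled off: output contributed from prev_char onward
def gA (sep : List Char) (prev : List Char) : List Char → List Char
  | [] => []
  | c :: rest => (if condA prev c then sep ++ [c] else [c]) ++ gA sep [c] rest

theorem foldl_stepA (sep : List Char) :
    ∀ (l : List Char) (acc prev : List Char),
      (l.foldl (stepA sep) (acc, prev)).1 = acc ++ gA sep prev l := by
  intro l
  induction l with
  | nil => intro acc prev; simp [gA]
  | cons c rest ih =>
      intro acc prev
      by_cases h : condA prev c = true <;>
        simp [stepA, gA, h, ih, List.append_assoc]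

-- a character is never both alphabetic and a digit
theorem alpha_not_digit (c : Char) :
    PySem.Chars.isalpha c = true → PySem.Chars.isdigit c = false := by
  have hA : 'A'.val.toNat = 65 := rfl
  have hZ : 'Z'.val.toNat = 90 := rfl
  have ha : 'a'.val.toNat = 97 := rfl
  have hz : 'z'.val.toNat = 122 := rfl
  have h0 : '0'.val.toNat = 48 := rfl
  have h9 : '9'.val.toNat = 57 := rfl
  simp only [PySem.Chars.isalpha, PySem.Chars.isupper, PySem.Chars.islower, PySem.Chars.isdigit,
    Bool.or_eq_true, Bool.and_eq_true, decide_eq_true_eq, Char.le_def, UInt32.le_iff_toNat_le,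
    hA, hZ, ha, hz, h0, h9]
  have hc : c.toNat = c.val.toNat := rfl
  rintro (⟨h1, h2⟩ | ⟨h1, h2⟩) <;> simp <;> omega

-- A's condition with a real previous char = B's run-boundary test on the classes
theorem condA_singleton (p c : Char) : condA [p] c = sepCondB (clsB p) (clsB c) := by
  have h1 := alpha_not_digit p
  have h2 := alpha_not_digit c
  cases hap : PySem.Chars.isalpha p <;> cases hac : PySem.Chars.isalpha c <;>
    cases hdp : PySem.Chars.isdigit p <;> cases hdc : PySem.Chars.isdigit c <;>
      simp_all [condA, clsB, sepCondB, pyIsnumeric, PySem.Chars.strIsalpha]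

theorem sepCondB_same (k : Int) : sepCondB k k = false := by
  simp only [sepCondB, Bool.or_eq_false_iff, Bool.and_eq_false_iff, beq_eq_false_iff_ne, ne_eq]
  omega

-- gA only reads the previous char through its class
theorem gA_congr (sep : List Char) (p q : Char) (l : List Char) (h : clsB p = clsB q) :
    gA sep [p] l = gA sep [q] l := by
  cases l with
  | nil => rfl
  | cons c rest => simp [gA, condA_singleton, h]

-- within a run of the previous char's class, A copies characters verbatim
theorem gA_run (sep : List Char) :
    ∀ (run : List Char) (p : Char) (rest : List Char), (∀ d ∈ run, clsB d = clsB p) →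
      gA sep [p] (run ++ rest) = run ++ gA sep [p] rest := by
  intro run
  induction run with
  | nil => intro p rest _; simp
  | cons r rs ih =>
      intro p rest h
      have hr : clsB r = clsB p := h r List.mem_cons_self
      have hcond : condA [p] r = false := by
        rw [condA_singleton, hr, sepCondB_same]
      have hrs : ∀ d ∈ rs, clsB d = clsB r := by
        intro d hd; rw [h d (List.mem_cons_of_mem _ hd), hr]
      simp only [List.cons_append, gA, hcond]
      rw [ih r rest hrs, gA_congr sep r p rest hr]
      simp

theorem sepCondB_neg_one (k : Int) : sepCondB (-1) k = false := by
  simp [sepCondB]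

theorem condA_nil (c : Char) : condA [] c = false := by
  simp [condA, PySem.Chars.strIsalpha, pyIsnumeric]

-- main correspondence: A's scan from a given prev_char = B's run loop from its class
theorem gA_runsB (sep : List Char) :
    ∀ (n : Nat) (l prev : List Char) (k : Int), l.length ≤ n →
      ((prev = [] ∧ k = -1) ∨ ∃ p, prev = [p] ∧ k = clsB p) →
      gA sep prev l = runsB sep k l := by
  intro n
  induction n with
  | zero =>
      intro l prev k hl _
      have : l = [] := List.eq_nil_of_length_eq_zero (Nat.le_zero.mp hl)
      subst this; cases prev <;> simp [gA, runsB]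
  | succ n ih =>
      intro l prev k hl hk
      cases l with
      | nil => cases prev <;> simp [gA, runsB]
      | cons c rest =>
          have hsplit : rest = rest.takeWhile (fun d => clsB d == clsB c) ++
              rest.dropWhile (fun d => clsB d == clsB c) :=
            (List.takeWhile_append_dropWhile).symm
          have htw : ∀ d ∈ rest.takeWhile (fun d => clsB d == clsB c), clsB d = clsB c := by
            intro d hd
            simpa using List.mem_takeWhile_imp hd
          have hdwlen : (rest.dropWhile (fun d => clsB d == clsB c)).length ≤ n := by
            have := List.Sublist.length_le (List.dropWhile_sublist
              (l := rest) (p := fun d => clsB d == clsB c))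
            simp at hl
            omega
          have htail : gA sep [c] rest =
              rest.takeWhile (fun d => clsB d == clsB c) ++
                runsB sep (clsB c) (rest.dropWhile (fun d => clsB d == clsB c)) := by
            conv_lhs => rw [hsplit]
            rw [gA_run sep _ c _ htw]
            rw [ih _ [c] (clsB c) hdwlen (Or.inr ⟨c, rfl, rfl⟩)]
          have hcond : condA prev c = sepCondB k (clsB c) := by
            rcases hk with ⟨hp, hkk⟩ | ⟨p, hp, hkk⟩
            · rw [hp, hkk, condA_nil, sepCondB_neg_one]
            · rw [hp, hkk, condA_singleton]
          rw [runsB]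
          simp only [gA, hcond, htail]
          by_cases h : sepCondB k (clsB c) = true <;> simp [h]

-- ===== VERDICT (by name: the statement is the Claim_ definition above) =====
theorem split_alphanumeric_spec : Claim_equal_split_alphanumeric := by
  intro value separator _
  unfold Spec_split_alphanumeric split_alphanumeric split_alphanumeric_alt
  rw [foldl_stepA]
  rw [gA_runsB separator.toList value.toList.length value.toList [] (-1) le_rfl
    (Or.inl ⟨rfl, rfl⟩)]
  rfl
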